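-- pv_equiv track=rewrite | github.com/Balaji-Coder06/Sign_language_translator | New folder/Moving_gestures.py | detect_wave
-- ===== SOURCE A (Python) =====
-- def detect_wave(x_list):
--     if len(x_list) < 6:
--         return False
--     direction_changes = 0
--     prev_diff = 0
--     for i in range(1, len(x_list)):
--         diff = x_list[i] - x_list[i - 1]
--         if diff * prev_diff < 0:
--             direction_changes += 1
--         if diff != 0:
--             prev_diff = diff
--     return direction_changes >= 2  # wave if direction changes 2+ times
-- ===== SOURCE B (Python) =====
-- def detect_wave(x_list):
--     if len(x_list) < 6:
--         return False
--     # collapse runs of equal values (keep one representative per run)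
--     y = [a for a, b in zip(x_list, x_list[1:]) if a != b] + [x_list[-1]]
--     # count strict local extrema (peaks/valleys) of the collapsed sequence
--     extrema = sum(1 for a, b, c in zip(y, y[1:], y[2:]) if (b - a) * (b - c) > 0)
--     return extrema >= 2
-- ===== Notes on version B (the rewrite author's own statement) =====
-- stated objective: alternative
-- what changed: Instead of A's single stateful scan carrying the last nonzero difference and a flip counter, B first collapses runs of equal adjacent values into a duplicate-free sequence and then counts its strict local extrema (peaks/valleys) via the sign of (b-a)*(b-c) over sliding triples, returning extrema >= 2.
import Mathlib
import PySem

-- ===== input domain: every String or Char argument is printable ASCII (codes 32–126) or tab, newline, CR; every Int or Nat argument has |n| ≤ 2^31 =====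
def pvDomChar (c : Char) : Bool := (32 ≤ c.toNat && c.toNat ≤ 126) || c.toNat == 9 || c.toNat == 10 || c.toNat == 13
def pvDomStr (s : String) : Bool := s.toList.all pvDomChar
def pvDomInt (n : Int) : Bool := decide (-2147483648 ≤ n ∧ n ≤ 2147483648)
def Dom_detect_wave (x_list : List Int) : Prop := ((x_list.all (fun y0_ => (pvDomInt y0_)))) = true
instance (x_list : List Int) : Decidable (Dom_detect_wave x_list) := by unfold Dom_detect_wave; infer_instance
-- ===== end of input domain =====

-- B replaces A's stateful prev-diff/counter scan by collapsing runs of equal values and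
-- counting strict local extrema (peaks/valleys) of the collapsed sequence (objective: alternative).

-- ===== PORT A =====
def detect_wave (x_list : List Int) : Bool :=
  if x_list.length < 6 then false
  else
    let st := (PySem.List.pyRange 1 x_list.length 1).foldl
      (fun (st : Int × Int) i =>
        let diff := PySem.List.pyGetD x_list i 0 - PySem.List.pyGetD x_list (i - 1) 0
        let dc := if diff * st.2 < 0 then st.1 + 1 else st.1
        let pd := if diff != 0 then diff else st.2
        (dc, pd)) (0, 0)
    decide (st.1 ≥ 2)

-- ===== PORT B =====
def detect_wave_alt (x_list : List Int) : Bool :=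
  if x_list.length < 6 then false
  else
    -- y = [a for a, b in zip(x_list, x_list[1:]) if a != b] + [x_list[-1]]
    let y := ((x_list.zip (PySem.List.slice x_list (some 1) none)).filter
        (fun p => p.1 != p.2)).map Prod.fst ++ [PySem.List.pyGetD x_list (-1) 0]
    -- extrema = sum(1 for a, b, c in zip(y, y[1:], y[2:]) if (b - a) * (b - c) > 0)
    let extrema := (((y.zip (PySem.List.slice y (some 1) none)).zip
        (PySem.List.slice y (some 2) none)).map
        (fun t => if (t.1.2 - t.1.1) * (t.1.2 - t.2) > 0 then (1 : Int) else 0)).sum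
    decide (extrema ≥ 2)

-- ===== PRECONDITION & SPEC =====
def Spec_detect_wave (x_list : List Int) (out : Bool) : Prop := out = detect_wave_alt x_list
instance (x_list : List Int) (out : Bool) : Decidable (Spec_detect_wave x_list out) := by unfold Spec_detect_wave; infer_instance

-- ===== CLAIM (what is proved, stated in full; the proofs are below) =====
def Claim_equal_detect_wave : Prop := ∀ (x_list : List Int), Dom_detect_wave x_list → Spec_detect_wave x_list (detect_wave x_list)

-- ===== LEMMAS AND PROOFS =====

-- A's loop step, over a diff value
def pvStep (st : Int × Int) (diff : Int) : Int × Int :=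
  (if diff * st.2 < 0 then st.1 + 1 else st.1, if diff != 0 then diff else st.2)

-- consecutive differences
def pvDiffs : List Int → List Int
  | a :: b :: t => (b - a) :: pvDiffs (b :: t)
  | _ => []

-- collapse runs of equal adjacent values
def pvComp : List Int → List Int
  | a :: b :: t => if a = b then pvComp (b :: t) else a :: pvComp (b :: t)
  | l => l

-- adjacent sign flips in a diff list
def pvFlips : List Int → Int
  | d1 :: d2 :: t => (if d1 * d2 < 0 then 1 else 0) + pvFlips (d2 :: t)
  | _ => 0

-- strict local extrema count
def pvTCount : List Int → Int
  | a :: b :: c :: t => (if (b - a) * (b - c) > 0 then 1 else 0) + pvTCount (b :: c :: t)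
  | _ => 0

-- flips counted from a remembered previous nonzero diff (A's accumulator, functionally)
def pvFlipsFrom (prev : Int) : List Int → Int
  | [] => 0
  | d :: t => (if d * prev < 0 then 1 else 0) + pvFlipsFrom (if d != 0 then d else prev) t

lemma pvFoldl_eq_flipsFrom (ds : List Int) (dc prev : Int) :
    (ds.foldl pvStep (dc, prev)).1 = dc + pvFlipsFrom prev ds := by
  induction ds generalizing dc prev with
  | nil => simp [pvFlipsFrom]
  | cons d t ih =>
    simp only [List.foldl_cons, pvStep, pvFlipsFrom, ih]
    split_ifs <;> ring

lemma pvFlipsFrom_eq (ds : List Int) (prev : Int) :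
    pvFlipsFrom prev ds =
      if prev = 0 then pvFlips (ds.filter (fun d => d != 0))
      else pvFlips (prev :: ds.filter (fun d => d != 0)) := by
  induction ds generalizing prev with
  | nil => split_ifs <;> simp [pvFlipsFrom, pvFlips]
  | cons d t ih =>
    by_cases hd : d = 0
    · subst hd
      simp only [pvFlipsFrom, List.filter_cons]
      norm_num [ih]
    · simp only [pvFlipsFrom, List.filter_cons, bne_iff_ne, ne_eq, hd, not_false_eq_true,
        if_true]
      rw [ih]
      simp only [hd, if_false]
      by_cases hp : prev = 0
      · subst hp; simp
      · simp only [hp, if_false, pvFlips]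
        rw [mul_comm]

lemma pvComp_cons (b : Int) (t : List Int) : ∃ r, pvComp (b :: t) = b :: r := by
  induction t generalizing b with
  | nil => exact ⟨[], rfl⟩
  | cons c t' ih =>
    by_cases h : b = c
    · subst h; obtain ⟨r, hr⟩ := ih b; exact ⟨r, by simp [pvComp, hr]⟩
    · exact ⟨pvComp (c :: t'), by simp [pvComp, h]⟩

lemma pvDiffs_comp (x : List Int) :
    pvDiffs (pvComp x) = (pvDiffs x).filter (fun d => d != 0) := by
  induction x with
  | nil => rfl
  | cons a t ih =>
    cases t with
    | nil => rfl
    | cons b t' =>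
      by_cases h : a = b
      · subst h
        simp only [pvComp, if_true, pvDiffs, List.filter_cons]
        norm_num [ih]
      · obtain ⟨r, hr⟩ := pvComp_cons b t'
        have hne : b - a ≠ 0 := fun hc => h (by omega)
        simp only [pvComp, h, if_false, pvDiffs, List.filter_cons, hr]
        simp only [bne_iff_ne, ne_eq, hne, not_false_eq_true, if_true]
        rw [← hr, ih]

lemma pvZip_comp_aux (t : List Int) (a : Int) :
    (((a :: t).zip t).filter (fun p => p.1 != p.2)).map Prod.fst
      ++ [(a :: t).getLast (List.cons_ne_nil a t)] = pvComp (a :: t) := by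
  induction t generalizing a with
  | nil => rfl
  | cons b t' ih =>
    have hlast : (a :: b :: t').getLast (List.cons_ne_nil a (b :: t'))
        = (b :: t').getLast (List.cons_ne_nil b t') :=
      List.getLast_cons (List.cons_ne_nil b t')
    by_cases hab : a = b
    · subst hab
      simp only [List.zip_cons_cons, List.filter_cons, bne_self_eq_false, Bool.false_eq_true,
        if_false, hlast, pvComp]
      exact ih a
    · simp only [List.zip_cons_cons, List.filter_cons, bne_iff_ne, ne_eq, hab,
        not_false_eq_true, if_true, List.map_cons, List.cons_append, hlast]
      rw [ih b]
      simp [pvComp, hab]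

lemma pvZip_comp (x : List Int) (h : x ≠ []) :
    ((x.zip x.tail).filter (fun p => p.1 != p.2)).map Prod.fst ++ [x.getLast h] = pvComp x := by
  cases x with
  | nil => exact absurd rfl h
  | cons a t => exact pvZip_comp_aux t a

lemma pvZip3_sum (y : List Int) :
    (((y.zip y.tail).zip y.tail.tail).map
      (fun t => if (t.1.2 - t.1.1) * (t.1.2 - t.2) > 0 then (1 : Int) else 0)).sum
    = pvTCount y := by
  induction y with
  | nil => rfl
  | cons a t ih =>
    cases t with
    | nil => rfl
    | cons b t' =>
      cases t' with
      | nil => rfl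
      | cons c t'' =>
        have : ((a :: b :: c :: t'').zip (b :: c :: t'')).zip (c :: t'') =
            ((a, b), c) :: (((b :: c :: t'').zip (c :: t'')).zip t'') := rfl
        simp only [List.tail_cons, this, List.map_cons, List.sum_cons, pvTCount]
        simp only [List.tail_cons] at ih
        rw [ih]

lemma pvTCount_eq_flips (y : List Int) : pvTCount y = pvFlips (pvDiffs y) := by
  induction y with
  | nil => rfl
  | cons a t ih =>
    cases t with
    | nil => rfl
    | cons b t' =>
      cases t' with
      | nil => rfl
      | cons c t'' =>
        show (if (b - a) * (b - c) > 0 then (1 : Int) else 0) + pvTCount (b :: c :: t'')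
            = (if (b - a) * (c - b) < 0 then (1 : Int) else 0) + pvFlips (pvDiffs (b :: c :: t''))
        have hiff : ((b - a) * (b - c) > 0) ↔ ((b - a) * (c - b) < 0) := by
          have h : (b - a) * (b - c) = -((b - a) * (c - b)) := by ring
          rw [h]; exact neg_pos
        rw [if_congr hiff rfl rfl, ih]

lemma pvDiffs_range_map (x : List Int) :
    (PySem.List.pyRange 1 x.length 1).map
      (fun i => PySem.List.pyGetD x i 0 - PySem.List.pyGetD x (i - 1) 0) = pvDiffs x := by
  rw [PySem.List.pyRange_one]
  have hlen : ((x.length : Int) - 1).toNat = x.length - 1 := by omega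
  rw [hlen, List.map_map]
  have hfun : ∀ k : Nat,
      (fun i => PySem.List.pyGetD x i 0 - PySem.List.pyGetD x (i - 1) 0) ((1 : Int) + k)
      = x.getD (k + 1) 0 - x.getD k 0 := by
    intro k
    have h1 : (1 : Int) + k = ((k + 1 : Nat) : Int) := by push_cast; ring
    simp only [h1]
    rw [PySem.List.pyGetD_natCast]
    have : ((k + 1 : Nat) : Int) - 1 = ((k : Nat) : Int) := by push_cast; ring
    rw [this, PySem.List.pyGetD_natCast]
  have hmap : (List.range (x.length - 1)).map
      ((fun i => PySem.List.pyGetD x i 0 - PySem.List.pyGetD x (i - 1) 0) ∘ (fun k : Nat => (1 : Int) + k))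
      = (List.range (x.length - 1)).map (fun k => x.getD (k + 1) 0 - x.getD k 0) := by
    apply List.map_congr_left
    intro k _
    exact hfun k
  rw [hmap]
  clear hfun hmap hlen
  induction x with
  | nil => rfl
  | cons a t ih =>
    cases t with
    | nil => rfl
    | cons b t' =>
      have hl : (a :: b :: t').length - 1 = ((b :: t').length - 1) + 1 := by
        simp [List.length_cons]
      rw [hl, List.range_succ_eq_map, List.map_cons, List.map_map]
      refine congrArg₂ List.cons rfl ?_
      rw [← ih]
      apply List.map_congr_left
      intro k _
      simp

-- ===== VERDICT (by name: the statement is the Claim_ definition above) =====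
theorem detect_wave_spec : Claim_equal_detect_wave := by
  intro x_list _
  unfold Spec_detect_wave detect_wave detect_wave_alt
  by_cases hlen : x_list.length < 6
  · simp [hlen]
  · simp only [hlen, if_false]
    have hne : x_list ≠ [] := by
      intro hc; rw [hc] at hlen; simp at hlen
    -- A side
    have hfold :
        (PySem.List.pyRange 1 x_list.length 1).foldl
          (fun (st : Int × Int) i =>
            let diff := PySem.List.pyGetD x_list i 0 - PySem.List.pyGetD x_list (i - 1) 0
            let dc := if diff * st.2 < 0 then st.1 + 1 else st.1
            let pd := if diff != 0 then diff else st.2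
            (dc, pd)) (0, 0)
        = ((PySem.List.pyRange 1 x_list.length 1).map
            (fun i => PySem.List.pyGetD x_list i 0 - PySem.List.pyGetD x_list (i - 1) 0)).foldl
            pvStep (0, 0) := by
      rw [List.foldl_map]
      rfl
    -- B side: identify y with pvComp x_list
    have hlast : PySem.List.pyGetD x_list (-1) 0 = x_list.getLast hne :=
      PySem.List.pyGetD_neg_one (xs := x_list) (d := 0) hne
    have hslicey1 : ∀ y : List Int, PySem.List.slice y (some 1) none = y.tail :=
      fun y => PySem.List.slice_from_one y
    have hslicey2 : ∀ y : List Int, PySem.List.slice y (some 2) none = y.tail.tail := by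
      intro y
      rw [PySem.List.slice_from (xs := y) (a := 2) (by norm_num)]
      show y.drop ((2 : Int).toNat) = y.tail.tail
      rcases y with _ | ⟨a, _ | ⟨b, t⟩⟩ <;> rfl
    simp only [hfold, pvDiffs_range_map, pvFoldl_eq_flipsFrom, zero_add, pvFlipsFrom_eq,
      if_true, hslicey1, hslicey2, hlast, pvZip_comp x_list hne, pvZip3_sum,
      pvTCount_eq_flips, pvDiffs_comp]
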